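-- pv_equiv track=rewrite | github.com/TheAnsarya/dq3r-info | tools/analysis/multi_rom_comparator.py | identify_text_context
-- ===== SOURCE A (Python) =====
-- def identify_text_context(offset: int) -> str:
-- 	"""Identify context of text based on offset"""
-- 	# Known text regions for DQ3
-- 	text_regions = {
-- 		(0x200000, 0x210000): "dialogue",
-- 		(0x210000, 0x220000): "menu",
-- 		(0x220000, 0x230000): "items",
-- 		(0x230000, 0x240000): "monsters",
-- 		(0x240000, 0x250000): "spells"
-- 	}
--
-- 	for (start, end), context in text_regions.items():
-- 		if start <= offset < end:
-- 			return context
--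
-- 	return "unknown"
-- ===== SOURCE B (Python) =====
-- REGIONS = ["dialogue", "menu", "items", "monsters", "spells"]
--
-- def identify_text_context(offset: int) -> str:
-- 	"""Identify context of text based on offset"""
-- 	if 0x200000 <= offset < 0x250000:
-- 		return REGIONS[(offset - 0x200000) // 0x10000]
-- 	return "unknown"
-- ===== Notes on version B (the rewrite author's own statement) =====
-- stated objective: simpler
-- what changed: Replaced the linear scan over the five-entry range dict with one bounds check and an arithmetic bucket index into a region-name list.
import Mathlib
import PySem

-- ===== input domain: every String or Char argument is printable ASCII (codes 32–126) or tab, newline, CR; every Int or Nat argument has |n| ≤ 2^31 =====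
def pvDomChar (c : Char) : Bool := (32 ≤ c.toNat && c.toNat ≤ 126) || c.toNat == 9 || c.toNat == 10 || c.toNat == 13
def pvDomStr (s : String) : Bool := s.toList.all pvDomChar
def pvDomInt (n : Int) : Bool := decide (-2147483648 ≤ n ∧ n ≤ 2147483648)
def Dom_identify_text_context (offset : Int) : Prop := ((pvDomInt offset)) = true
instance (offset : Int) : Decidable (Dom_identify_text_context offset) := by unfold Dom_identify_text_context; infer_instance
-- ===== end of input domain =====

-- B replaces A's linear scan over the range table with one bounds check and an arithmetic bucket index (simpler).

-- ===== PORT A =====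
-- the literal dict of A, in insertion order
def pvTextRegions : List ((Int × Int) × String) :=
  [((0x200000, 0x210000), "dialogue"),
   ((0x210000, 0x220000), "menu"),
   ((0x220000, 0x230000), "items"),
   ((0x230000, 0x240000), "monsters"),
   ((0x240000, 0x250000), "spells")]

-- the for-loop over text_regions.items() with early return
def pvScanRegions (offset : Int) : List ((Int × Int) × String) → String
  | [] => "unknown"
  | ((s, e), ctx) :: rest => if s ≤ offset ∧ offset < e then ctx else pvScanRegions offset rest

def identify_text_context (offset : Int) : String :=
  pvScanRegions offset pvTextRegions

-- ===== PORT B =====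
def pvRegions : List String := ["dialogue", "menu", "items", "monsters", "spells"]

def identify_text_context_alt (offset : Int) : String :=
  if 0x200000 ≤ offset ∧ offset < 0x250000 then
    -- REGIONS[(offset - 0x200000) // 0x10000]; the index is in [0,5) under the guard
    (PySem.List.pyGet? pvRegions (PySem.Int.floordiv (offset - 0x200000) 0x10000)).getD ""
  else "unknown"

-- ===== PRECONDITION & SPEC =====
def Spec_identify_text_context (offset : Int) (out : String) : Prop := out = identify_text_context_alt offset
instance (offset : Int) (out : String) : Decidable (Spec_identify_text_context offset out) := by unfold Spec_identify_text_context; infer_instance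

-- ===== CLAIM (what is proved, stated in full; the proofs are below) =====
def Claim_equal_identify_text_context : Prop := ∀ (offset : Int), Dom_identify_text_context offset → Spec_identify_text_context offset (identify_text_context offset)

-- ===== LEMMAS AND PROOFS =====
theorem pv_fdiv_eq (a : Int) : PySem.Int.floordiv a 65536 = a / 65536 := by
  unfold PySem.Int.floordiv
  exact Int.fdiv_eq_ediv_of_nonneg _ (by norm_num)

theorem pv_eq (offset : Int) : identify_text_context offset = identify_text_context_alt offset := by
  unfold identify_text_context identify_text_context_alt pvTextRegions pvRegions
  rw [pv_fdiv_eq]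
  by_cases h1 : (0x200000 : Int) ≤ offset ∧ offset < 0x210000
  · have e : (offset - 0x200000) / 65536 = 0 := by omega
    simp [pvScanRegions, h1, e, PySem.List.pyGet?, PySem.List.pyIdx?] <;> omega
  · by_cases h2 : (0x210000 : Int) ≤ offset ∧ offset < 0x220000
    · have e : (offset - 0x200000) / 65536 = 1 := by omega
      simp [pvScanRegions, h1, h2, e, PySem.List.pyGet?, PySem.List.pyIdx?] <;> omega
    · by_cases h3 : (0x220000 : Int) ≤ offset ∧ offset < 0x230000
      · have e : (offset - 0x200000) / 65536 = 2 := by omega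
        simp [pvScanRegions, h1, h2, h3, e, PySem.List.pyGet?, PySem.List.pyIdx?] <;> omega
      · by_cases h4 : (0x230000 : Int) ≤ offset ∧ offset < 0x240000
        · have e : (offset - 0x200000) / 65536 = 3 := by omega
          simp [pvScanRegions, h1, h2, h3, h4, e, PySem.List.pyGet?, PySem.List.pyIdx?] <;> omega
        · by_cases h5 : (0x240000 : Int) ≤ offset ∧ offset < 0x250000
          · have e : (offset - 0x200000) / 65536 = 4 := by omega
            simp [pvScanRegions, h1, h2, h3, h4, h5, e, PySem.List.pyGet?, PySem.List.pyIdx?] <;> omega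
          · have hout : ¬ ((0x200000 : Int) ≤ offset ∧ offset < 0x250000) := by omega
            simp [pvScanRegions, h1, h2, h3, h4, h5, hout]

-- ===== VERDICT (by name: the statement is the Claim_ definition above) =====
theorem identify_text_context_spec : Claim_equal_identify_text_context := by
  intro offset _
  unfold Spec_identify_text_context
  exact pv_eq offset
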